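-- pv_equiv track=rewrite | github.com/SamualAdams/local-lenk | lenk/service.py | parse_markdown_cells
-- ===== SOURCE A (Python) =====
-- from typing import List, Optional
--
-- def parse_markdown_cells(content: str) -> List[str]:
--     lines = content.split('\n')
--     current_cell: List[str] = []
--     cells: List[str] = []
--
--     for line in lines:
--         if line.startswith('#') and current_cell:
--             cells.append('\n'.join(current_cell))
--             current_cell = [line]
--         else:
--             current_cell.append(line)
--
--     if current_cell:
--         cells.append('\n'.join(current_cell))
--
--     if not cells:
--         cells = [content]
--     return cells
-- ===== SOURCE B (Python) =====
-- def parse_markdown_cells(content):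
--     lines = content.split('\n')
--     starts = [i for i, line in enumerate(lines) if i == 0 or line.startswith('#')]
--     ends = starts[1:] + [len(lines)]
--     return ['\n'.join(lines[a:b]) for a, b in zip(starts, ends)]
-- ===== Notes on version B (the rewrite author's own statement) =====
-- stated objective: alternative
-- what changed: Replaces A's single stateful accumulation loop (current_cell/cells with flush-on-heading and a final flush plus fallback) by computing the boundary indices first (0 and every heading line's index) and then building each cell by joining a slice between consecutive boundaries.
import Mathlib
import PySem

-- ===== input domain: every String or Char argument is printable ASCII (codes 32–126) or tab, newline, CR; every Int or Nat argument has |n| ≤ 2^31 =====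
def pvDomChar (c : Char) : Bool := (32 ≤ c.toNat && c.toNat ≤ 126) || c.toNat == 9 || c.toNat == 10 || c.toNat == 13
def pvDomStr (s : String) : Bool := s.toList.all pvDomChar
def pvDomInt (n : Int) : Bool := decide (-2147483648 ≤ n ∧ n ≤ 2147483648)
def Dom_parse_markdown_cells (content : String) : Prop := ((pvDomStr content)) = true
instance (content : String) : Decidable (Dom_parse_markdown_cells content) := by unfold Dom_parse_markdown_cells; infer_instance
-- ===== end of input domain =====

-- B re-decomposes A's stateful line-by-line accumulation into boundary indices collected first, then one slicing pass (objective: alternative decomposition; same value everywhere).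

-- ===== PORT A =====
-- A: split into lines, then a stateful loop carrying (current_cell, cells); a heading line
-- flushes the current cell; final flush; fallback [content] when cells is empty.
def parse_markdown_cells (content : String) : List String :=
  let lines := (PySem.Str.split? content "\n").getD []
  let st := lines.foldl
    (fun (st : List String × List String) line =>
      if PySem.Str.startswith line "#" && !st.1.isEmpty then
        ([line], st.2 ++ [PySem.Str.join "\n" st.1])
      else
        (st.1 ++ [line], st.2))
    ([], [])
  let cells := if st.1.isEmpty then st.2 else st.2 ++ [PySem.Str.join "\n" st.1]
  if cells.isEmpty then [content] else cells

-- ===== PORT B =====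
-- B: collect boundary indices (0 and every heading line), pair consecutive boundaries, join slices.
def parse_markdown_cells_alt (content : String) : List String :=
  let lines := (PySem.Str.split? content "\n").getD []
  let starts := ((PySem.List.enumerate lines).filter
      (fun p => p.1 == 0 || PySem.Str.startswith p.2 "#")).map (fun p => p.1)
  let ends := PySem.List.slice starts (some 1) none ++ [PySem.List.len lines]
  (starts.zip ends).map (fun pr => PySem.Str.join "\n" (PySem.List.slice lines (some pr.1) (some pr.2)))

-- ===== PRECONDITION & SPEC =====
def Spec_parse_markdown_cells (content : String) (out : List String) : Prop := out = parse_markdown_cells_alt content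
instance (content : String) (out : List String) : Decidable (Spec_parse_markdown_cells content out) := by unfold Spec_parse_markdown_cells; infer_instance

-- ===== CLAIM (what is proved, stated in full; the proofs are below) =====
def Claim_equal_parse_markdown_cells : Prop := ∀ (content : String), Dom_parse_markdown_cells content → Spec_parse_markdown_cells content (parse_markdown_cells content)

-- ===== LEMMAS AND PROOFS =====

-- A's loop body and final flush, named for the proofs (definitionally A's inline code).
def pvStep (st : List String × List String) (line : String) : List String × List String :=
  if PySem.Str.startswith line "#" && !st.1.isEmpty then
    ([line], st.2 ++ [PySem.Str.join "\n" st.1])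
  else
    (st.1 ++ [line], st.2)

def pvFinish (st : List String × List String) : List String :=
  if st.1.isEmpty then st.2 else st.2 ++ [PySem.Str.join "\n" st.1]

-- The chunk structure both programs compute: cells of lines, a '#'-line opens a new cell.
def pvChunks (cur : List String) : List String → List (List String)
  | [] => [cur]
  | l :: ls =>
    if PySem.Str.startswith l "#" then cur :: pvChunks [l] ls
    else pvChunks (cur ++ [l]) ls

theorem pvChunks_ne_nil (cur : List String) (rest : List String) : pvChunks cur rest ≠ [] := by
  induction rest generalizing cur with
  | nil => simp [pvChunks]
  | cons l ls ih => simp only [pvChunks]; split <;> simp [ih]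

-- Chars.splitOn.go never returns [] (each exit returns (_ :: acc).reverse).
theorem pv_go_ne_nil (sep : List Char) (fuel : Nat) (l cur : List Char) (acc : List (List Char)) :
    PySem.Chars.splitOn.go sep fuel l cur acc ≠ [] := by
  induction fuel generalizing l cur acc with
  | zero => simp [PySem.Chars.splitOn.go]
  | succ n ih =>
    cases l with
    | nil => simp [PySem.Chars.splitOn.go]
    | cons c rest =>
      rw [PySem.Chars.splitOn.go]
      split <;> apply ih

theorem pv_split_cons (content : String) :
    ∃ l0 rest, (PySem.Str.split? content "\n").getD [] = l0 :: rest := by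
  have h : PySem.Chars.splitOn content.toList "\n".toList ≠ [] := pv_go_ne_nil _ _ _ _ _
  simp only [PySem.Str.split?, PySem.Chars.split?]
  cases hc : PySem.Chars.splitOn content.toList "\n".toList with
  | nil => exact absurd hc h
  | cons a as => exact ⟨String.ofList a, as.map String.ofList, by simp⟩

-- A-side: the fold plus the final flush computes cells ++ joined chunks.
theorem pvA_loop (rest : List String) (cur cells : List String) (h : cur ≠ []) :
    pvFinish (rest.foldl pvStep (cur, cells))
      = cells ++ (pvChunks cur rest).map (PySem.Str.join "\n") := by
  induction rest generalizing cur cells with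
  | nil => simp [pvFinish, pvChunks, List.isEmpty_iff, h]
  | cons l ls ih =>
    simp only [List.foldl_cons, pvChunks]
    by_cases hp : PySem.Str.startswith l "#" = true
    · have hpc : PySem.Chars.startswith l.toList ['#'] = true := by
        simpa [PySem.Str.startswith] using hp
      rw [show pvStep (cur, cells) l = ([l], cells ++ [PySem.Str.join "\n" cur]) by
        simp [pvStep, hpc, h]]
      rw [ih [l] _ (by simp), if_pos hp]
      simp
    · have hpc : PySem.Chars.startswith l.toList ['#'] = false := by
        rw [Bool.eq_false_iff]
        simpa [PySem.Str.startswith] using hp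
      rw [show pvStep (cur, cells) l = (cur ++ [l], cells) by
        simp [pvStep, hpc]]
      rw [ih (cur ++ [l]) _ (by simp), if_neg hp]

-- cuts: the heading indices of `rest`, enumerated from `s`.
def pvCuts (rest : List String) (s : Int) : List Int :=
  ((PySem.List.enumerate rest s).filter (fun q => PySem.Str.startswith q.2 "#")).map (fun q => q.1)

theorem pvCuts_cons (l : String) (ls : List String) (s : Int) :
    pvCuts (l :: ls) s =
      (if PySem.Str.startswith l "#" then [s] else []) ++ pvCuts ls (s + 1) := by
  simp only [pvCuts, PySem.List.enumerate_cons, List.filter_cons]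
  split <;> simp

-- B-side: absolute-index slicing over pref ++ cur ++ rest matches the chunk structure.
theorem pvB_loop (rest : List String) (pref cur : List String) (h : cur ≠ []) :
    ((((pref.length : Int) :: pvCuts rest ((pref.length + cur.length : Nat) : Int)).zip
       (pvCuts rest ((pref.length + cur.length : Nat) : Int) ++ [PySem.List.len (pref ++ cur ++ rest)])).map
      (fun pr => PySem.Str.join "\n" (PySem.List.slice (pref ++ cur ++ rest) (some pr.1) (some pr.2))))
    = (pvChunks cur rest).map (PySem.Str.join "\n") := by
  induction rest generalizing pref cur with
  | nil =>
    simp only [pvCuts, PySem.List.enumerate_nil, List.filter_nil, List.map_nil, List.nil_append,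
      List.zip_cons_cons, List.zip_nil_right, List.map_cons, PySem.List.len_eq, List.append_nil,
      pvChunks]
    rw [show ((pref ++ cur).length : Int) = (((pref.length + cur.length : Nat)) : Int) by
      simp [List.length_append]]
    rw [PySem.List.slice_natCast]
    rw [List.drop_left, Nat.add_sub_cancel_left, List.take_length]
  | cons l ls ih =>
    by_cases hp : PySem.Str.startswith l "#" = true
    · have hpc : PySem.Chars.startswith l.toList ['#'] = true := by
        simpa [PySem.Str.startswith] using hp
      rw [pvCuts_cons, if_pos hp]
      simp only [List.cons_append, List.nil_append, List.zip_cons_cons, List.map_cons]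
      have h2 : (((pref.length + cur.length : Nat) : Int) + 1)
          = (((pref ++ cur).length + ([l] : List String).length : Nat) : Int) := by
        simp only [List.length_append, List.length_cons, List.length_nil]; push_cast; ring
      rw [h2]
      rw [show pref ++ cur ++ l :: ls = (pref ++ cur) ++ [l] ++ ls by simp]
      rw [show ((pref.length + cur.length : Nat) : Int) = (((pref ++ cur).length : Nat) : Int) by
        simp [List.length_append]]
      rw [ih (pref ++ cur) [l] (by simp)]
      rw [PySem.List.slice_natCast]
      rw [show (pref ++ cur) ++ [l] ++ ls = pref ++ (cur ++ ([l] ++ ls)) by simp]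
      rw [List.drop_left, List.length_append, Nat.add_sub_cancel_left, List.take_left]
      simp [pvChunks, hpc]
    · have hpc : PySem.Chars.startswith l.toList ['#'] = false := by
        rw [Bool.eq_false_iff]
        simpa [PySem.Str.startswith] using hp
      rw [pvCuts_cons, if_neg hp]
      simp only [List.nil_append]
      have h2 : (((pref.length + cur.length : Nat) : Int) + 1)
          = ((pref.length + (cur ++ [l]).length : Nat) : Int) := by
        simp only [List.length_append, List.length_cons, List.length_nil]; push_cast; ring
      rw [h2]
      rw [show pref ++ cur ++ l :: ls = pref ++ (cur ++ [l]) ++ ls by simp]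
      rw [ih pref (cur ++ [l]) (by simp)]
      simp [pvChunks, hpc]

-- ===== VERDICT (by name: the statement is the Claim_ definition above) =====
theorem parse_markdown_cells_spec : Claim_equal_parse_markdown_cells := by
  intro content _
  unfold Spec_parse_markdown_cells
  obtain ⟨l0, rest, hl⟩ := pv_split_cons content
  -- A side
  rw [parse_markdown_cells, parse_markdown_cells_alt, hl]
  have hstep : (fun (st : List String × List String) line =>
      if PySem.Str.startswith line "#" && !st.1.isEmpty then
        ([line], st.2 ++ [PySem.Str.join "\n" st.1])
      else
        (st.1 ++ [line], st.2)) = pvStep := rfl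
  rw [hstep]
  rw [List.foldl_cons]
  rw [show pvStep ([], []) l0 = ([l0], ([] : List String)) by simp [pvStep]]
  have hA := pvA_loop rest [l0] [] (by simp)
  rw [pvFinish] at hA
  rw [hA]
  rw [if_neg (by simp [pvChunks_ne_nil])]
  -- B side
  rw [PySem.List.enumerate_cons, List.filter_cons]
  rw [if_pos (by simp)]
  rw [List.filter_congr (q := fun q : Int × String => PySem.Str.startswith q.2 "#")
    (fun q hq => by
      obtain ⟨k, hk, rfl⟩ := (PySem.List.mem_enumerate_iff _ _ _).1 hq
      have hz : ((0 + 1 + (k : Int)) == 0) = false := by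
        rw [beq_eq_false_iff_ne]; omega
      show ((0 + 1 + (k : Int) == 0) || PySem.Str.startswith rest[k] "#")
          = PySem.Str.startswith rest[k] "#"
      rw [hz, Bool.false_or])]
  simp only [List.map_cons]
  have hB := pvB_loop rest [] [l0] (by simp)
  simp only [List.length_nil, List.length_cons, List.nil_append,
    List.singleton_append, Nat.zero_add, Nat.cast_zero, Nat.cast_one] at hB
  rw [PySem.List.slice_from_one]
  simp only [List.tail_cons, show (0 : Int) + 1 = 1 from by norm_num]
  rw [show (((PySem.List.enumerate rest 1).filter (fun q : Int × String => PySem.Str.startswith q.2 "#")).map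
      (fun p => p.1)) = pvCuts rest 1 from rfl]
  rw [List.nil_append] at hA ⊢
  exact hB.symm
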